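-- pv_equiv track=rewrite | github.com/brukted/comptetive-programming | daily_questions/frog-jump-ii.py | maxJump
-- ===== SOURCE A (Python) =====
-- from typing import List
--
-- def maxJump(stones: List[int]) -> int:
--     diff_1 = 0
--     for i in range(2, len(stones), 2):
--         diff_1 = max(diff_1, stones[i] - stones[i - 2])
--
--     diff_2 = 0
--     for i in range(1, len(stones), 2):
--         diff_2 = max(diff_2, stones[i] - stones[max(i - 2, 0)])
--
--     return max(diff_1, diff_2)
-- ===== SOURCE B (Python) =====
-- def maxJump(stones):
--     # Work on the adjacent-difference list: stones[i] - stones[i-2] telescopes to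
--     # diffs[i-2] + diffs[i-1], so the answer is the max of 0, the first difference,
--     # and all sums of two consecutive differences.
--     diffs = [b - a for a, b in zip(stones, stones[1:])]
--     if not diffs:
--         return 0
--     best = max(0, diffs[0])
--     for x, y in zip(diffs, diffs[1:]):
--         best = max(best, x + y)
--     return best
-- ===== Notes on version B (the rewrite author's own statement) =====
-- stated objective: alternative
-- what changed: Instead of scanning index pairs two apart as A does, B first builds the adjacent-difference list and takes the max of 0, the first difference, and all sums of two consecutive differences, using the telescoping identity stones[i]-stones[i-2] = diffs[i-2]+diffs[i-1].
import Mathlib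
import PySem

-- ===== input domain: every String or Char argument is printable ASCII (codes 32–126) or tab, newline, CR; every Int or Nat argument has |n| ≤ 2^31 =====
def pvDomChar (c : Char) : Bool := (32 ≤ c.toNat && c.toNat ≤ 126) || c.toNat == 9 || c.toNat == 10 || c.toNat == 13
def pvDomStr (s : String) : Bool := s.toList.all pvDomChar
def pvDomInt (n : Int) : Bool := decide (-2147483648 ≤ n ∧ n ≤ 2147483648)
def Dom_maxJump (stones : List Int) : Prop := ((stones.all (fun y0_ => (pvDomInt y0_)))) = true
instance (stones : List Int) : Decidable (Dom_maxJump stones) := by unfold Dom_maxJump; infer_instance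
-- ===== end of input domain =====

-- B works on the adjacent-difference list instead of A's two alternating step-2 index
-- scans: it takes the max of 0, the first difference, and all sums of two consecutive
-- differences (stones[i]-stones[i-2] telescopes to diffs[i-2]+diffs[i-1]).
-- Objective: alternative algorithm of the same cost. Neither program mutates its argument.

-- ===== PORT A =====
def maxJump (stones : List Int) : Int :=
  let diff1 := (PySem.List.pyRange 2 (PySem.List.len stones) 2).foldl
      (fun acc i => max acc (PySem.List.pyGetD stones i 0 - PySem.List.pyGetD stones (i - 2) 0)) 0
  let diff2 := (PySem.List.pyRange 1 (PySem.List.len stones) 2).foldl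
      (fun acc i => max acc (PySem.List.pyGetD stones i 0 - PySem.List.pyGetD stones (max (i - 2) 0) 0)) 0
  max diff1 diff2

-- ===== PORT B =====
def maxJump_alt (stones : List Int) : Int :=
  let diffs := (stones.zip (PySem.List.slice stones (some 1) none)).map (fun p => p.2 - p.1)
  match diffs with
  | [] => 0
  | d0 :: _ =>
    (diffs.zip (PySem.List.slice diffs (some 1) none)).foldl
      (fun best p => max best (p.1 + p.2)) (max 0 d0)

-- ===== PRECONDITION & SPEC =====
def Spec_maxJump (stones : List Int) (out : Int) : Prop := out = maxJump_alt stones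
instance (stones : List Int) (out : Int) : Decidable (Spec_maxJump stones out) := by unfold Spec_maxJump; infer_instance

-- ===== CLAIM (what is proved, stated in full; the proofs are below) =====
def Claim_equal_maxJump : Prop := ∀ (stones : List Int), Dom_maxJump stones → Spec_maxJump stones (maxJump stones)

-- ===== LEMMAS AND PROOFS =====

-- range(a, b, 2) is empty when b ≤ a
theorem pyRange2_nil (a b : Int) (h : b ≤ a) : PySem.List.pyRange a b 2 = [] := by
  rw [PySem.List.pyRange_of_pos a b (by norm_num), if_neg (by omega)]
  simp

-- range(a, b, 2) = a :: range(a+2, b, 2) when a < b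
theorem pyRange2_cons (a b : Int) (h : a < b) :
    PySem.List.pyRange a b 2 = a :: PySem.List.pyRange (a + 2) b 2 := by
  rw [PySem.List.pyRange_of_pos a b (by norm_num),
      PySem.List.pyRange_of_pos (a + 2) b (by norm_num)]
  rw [if_pos h]
  have hk : ((b - a + 2 - 1) / 2).toNat
      = (if a + 2 < b then ((b - (a + 2) + 2 - 1) / 2).toNat else 0) + 1 := by
    split_ifs with h2 <;> omega
  rw [hk, List.range_succ_eq_map]
  simp only [List.map_cons, List.map_map]
  congr 1
  · norm_num
  · exact List.map_congr_left (fun k _ => by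
      simp only [Function.comp, Nat.succ_eq_add_one]; push_cast; ring)

-- range(a, b+1, 2) appends b when b ≡ a (mod 2) …
theorem pyRange2_succ_right_hit (a b : Int) (h : a ≤ b) (hpar : 2 ∣ (b - a)) :
    PySem.List.pyRange a (b + 1) 2 = PySem.List.pyRange a b 2 ++ [b] := by
  rw [PySem.List.pyRange_of_pos a (b + 1) (by norm_num),
      PySem.List.pyRange_of_pos a b (by norm_num)]
  obtain ⟨m, hm⟩ := hpar
  have h1 : ((b + 1 - a + 2 - 1) / 2).toNat = m.toNat + 1 := by omega
  have h2 : (if a < b then ((b - a + 2 - 1) / 2).toNat else 0) = m.toNat := by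
    split_ifs with hab <;> omega
  rw [if_pos (by omega), h1, h2, List.range_succ, List.map_append]
  simp
  omega

-- … and is unchanged otherwise
theorem pyRange2_succ_right_miss (a b : Int) (h : a ≤ b + 1) (hpar : ¬ 2 ∣ (b - a)) :
    PySem.List.pyRange a (b + 1) 2 = PySem.List.pyRange a b 2 := by
  rw [PySem.List.pyRange_of_pos a (b + 1) (by norm_num),
      PySem.List.pyRange_of_pos a b (by norm_num)]
  have hx : (if a < b + 1 then ((b + 1 - a + 2 - 1) / 2).toNat else 0)
      = if a < b then ((b - a + 2 - 1) / 2).toNat else 0 := by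
    split_ifs with h1 h2 <;> omega
  rw [hx]

-- the two step-2 ranges together are a permutation of the single step-1 range
theorem ranges_perm (m : Nat) :
    (PySem.List.pyRange 2 (m : Int) 2 ++ PySem.List.pyRange 3 (m : Int) 2).Perm
      (PySem.List.pyRange 2 (m : Int) 1) := by
  induction m with
  | zero => simp [pyRange2_nil, PySem.List.pyRange_one_eq_nil]
  | succ k ih =>
    by_cases hk : 2 ≤ k
    · have hk' : (2 : Int) ≤ (k : Int) := by exact_mod_cast hk
      push_cast
      rw [PySem.List.pyRange_one_succ_right hk']
      by_cases hpar : 2 ∣ ((k : Int) - 2)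
      · rw [pyRange2_succ_right_hit 2 k hk' hpar,
            pyRange2_succ_right_miss 3 k (by omega) (by omega)]
        have hstep : (PySem.List.pyRange 2 (k:Int) 2 ++ [(k:Int)] ++ PySem.List.pyRange 3 (k:Int) 2).Perm
            ((PySem.List.pyRange 2 (k:Int) 2 ++ PySem.List.pyRange 3 (k:Int) 2) ++ [(k:Int)]) := by
          rw [List.append_assoc, List.append_assoc]
          exact List.Perm.append_left _ List.perm_append_comm
        exact hstep.trans (ih.append_right _)
      · rw [pyRange2_succ_right_miss 2 k (by omega) hpar,
            pyRange2_succ_right_hit 3 k (by omega) (by omega)]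
        rw [← List.append_assoc]
        exact ih.append_right _
    · interval_cases k <;> decide

-- folding max starting from max a b splits off a
theorem foldl_max_max (l : List Int) : ∀ (a b : Int),
    List.foldl max (max a b) l = max a (List.foldl max b l) := by
  induction l with
  | nil => intro a b; rfl
  | cons x t ih =>
    intro a b
    simp only [List.foldl_cons, max_assoc]
    exact ih a (max b x)

-- merge two max-folds into one fold over the concatenation (init c ≥ 0)
theorem max_foldl_merge (E O : List Int) (c : Int) (hc : 0 ≤ c) :
    max (List.foldl max 0 E) (List.foldl max c O) = List.foldl max c (E ++ O) := by
  rw [List.foldl_append]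
  have h1 : List.foldl max c E = max c (List.foldl max 0 E) := by
    rw [← foldl_max_max]; congr 1; omega
  rw [h1, max_comm c (List.foldl max 0 E), foldl_max_max]

-- the gaps indexed by range(2, len, 1) are exactly the two-apart gaps
theorem gaps_eq_zip (stones : List Int) :
    ((PySem.List.pyRange 2 (stones.length : Int) 1).map
        (fun i => PySem.List.pyGetD stones i 0 - PySem.List.pyGetD stones (i - 2) 0))
      = (stones.zip (stones.drop 2)).map (fun p => p.2 - p.1) := by
  apply List.ext_getElem
  · simp only [List.length_map, List.length_zip, List.length_drop,
      PySem.List.length_pyRange_one]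
    omega
  · intro k h1 h2
    have hk : k < stones.length - 2 := by
      simp only [List.length_map, PySem.List.length_pyRange_one] at h1
      omega
    simp only [List.getElem_map, List.getElem_zip, PySem.List.getElem_pyRange_one]
    rw [PySem.List.pyGetD_eq_getElem stones 0 (by omega) (by omega),
        PySem.List.pyGetD_eq_getElem stones 0 (by omega) (by omega)]
    simp only [List.getElem_drop]
    congr 2
    omega

-- telescoping: the sums of two consecutive adjacent differences are the two-apart gaps
theorem sums_eq_gaps (stones : List Int) :
    ((((stones.zip (stones.drop 1)).map (fun p => p.2 - p.1)).zip
        (((stones.zip (stones.drop 1)).map (fun p => p.2 - p.1)).drop 1)).map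
          (fun p => p.1 + p.2))
      = (stones.zip (stones.drop 2)).map (fun p => p.2 - p.1) := by
  apply List.ext_getElem
  · simp only [List.length_map, List.length_zip, List.length_drop]
    omega
  · intro k h1 h2
    have hk : k < stones.length - 2 := by
      simp only [List.length_map, List.length_zip, List.length_drop] at h1
      omega
    simp only [List.getElem_map, List.getElem_zip, List.getElem_drop]
    simp only [show 1 + (1 + k) = 2 + k from by omega]
    ring

-- A as one max-fold over the two-apart gaps (length ≥ 2)
theorem a_eq (s0 s1 : Int) (t : List Int) :
    maxJump (s0 :: s1 :: t)
      = (((s0 :: s1 :: t).zip t).map (fun p => p.2 - p.1)).foldl max (max 0 (s1 - s0)) := by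
  set stones := s0 :: s1 :: t with hst
  have hlen : stones.length = t.length + 2 := by rw [hst]; simp
  unfold maxJump
  simp only [PySem.List.len]
  rw [pyRange2_cons 1 _ (by omega)]
  simp only [List.foldl_cons]
  rw [show max (1 - 2 : Int) 0 = 0 from by norm_num,
      show (1 : Int) + 2 = 3 from by norm_num]
  have hget1 : PySem.List.pyGetD stones 1 0 = s1 := by simp [hst, PySem.List.pyGetD]
  have hget0 : PySem.List.pyGetD stones 0 0 = s0 := by simp [hst, PySem.List.pyGetD]
  rw [hget1, hget0]
  set c := max 0 (s1 - s0) with hc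
  rw [PySem.List.foldl_congr_mem (PySem.List.pyRange 3 (stones.length : Int) 2)
    (fun acc i => max acc (PySem.List.pyGetD stones i 0 - PySem.List.pyGetD stones (max (i - 2) 0) 0))
    (fun acc i => max acc (PySem.List.pyGetD stones i 0 - PySem.List.pyGetD stones (i - 2) 0)) c
    (by
      intro acc x hx
      obtain ⟨h3, _, _⟩ := (PySem.List.mem_pyRange_iff_of_pos (by norm_num) x).mp hx
      simp only [show max (x - 2) 0 = x - 2 from by omega])]
  have key : ∀ (init : Int) (l : List Int),
      l.foldl (fun acc i => max acc (PySem.List.pyGetD stones i 0 - PySem.List.pyGetD stones (i - 2) 0)) init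
        = (l.map (fun i => PySem.List.pyGetD stones i 0 - PySem.List.pyGetD stones (i - 2) 0)).foldl max init :=
    fun init l => (List.foldl_map).symm
  rw [key 0, key c]
  rw [max_foldl_merge _ _ c (le_max_left 0 _), ← List.map_append]
  rw [((ranges_perm stones.length).map
    (fun i => PySem.List.pyGetD stones i 0 - PySem.List.pyGetD stones (i - 2) 0)).foldl_eq c]
  rw [gaps_eq_zip stones]
  rfl

-- B as the same max-fold (length ≥ 2)
theorem b_eq (s0 s1 : Int) (t : List Int) :
    maxJump_alt (s0 :: s1 :: t)
      = (((s0 :: s1 :: t).zip t).map (fun p => p.2 - p.1)).foldl max (max 0 (s1 - s0)) := by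
  simp only [maxJump_alt, PySem.List.slice_from_one, List.tail_cons, List.zip_cons_cons,
    List.map_cons]
  have key : ∀ (init : Int) (l : List (Int × Int)),
      l.foldl (fun best p => max best (p.1 + p.2)) init
        = (l.map (fun p => p.1 + p.2)).foldl max init :=
    fun init l => (List.foldl_map).symm
  rw [key]
  have hs := sums_eq_gaps (s0 :: s1 :: t)
  simp only [List.drop_one, List.tail_cons, List.zip_cons_cons, List.map_cons] at hs
  rw [hs]
  rfl

-- main equality (no precondition: both programs are total)
theorem maxJump_eq (stones : List Int) : maxJump stones = maxJump_alt stones := by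
  match stones with
  | [] => decide
  | [a] =>
    unfold maxJump maxJump_alt
    simp [PySem.List.len, pyRange2_nil 2 1 (by omega), pyRange2_nil 1 1 (by omega),
      PySem.List.slice_from_one]
  | s0 :: s1 :: t => rw [a_eq, b_eq]

-- ===== VERDICT (by name: the statement is the Claim_ definition above) =====
theorem maxJump_spec : Claim_equal_maxJump := by
  intro stones _
  exact maxJump_eq stones
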